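-- pv_equiv track=rewrite | github.com/gteu/atcoder | problems/abc/abc121/d.py | acc_parity
-- ===== SOURCE A (Python) =====
-- def acc_parity(x):
--     parity = ''
--     for i in range(40):
--         if i == 0:
--             parity += '1' if x % 4 == 1 or x % 4 == 2 else '0'
--         else:
--             parity += '1' if x % (2 ** (i + 1)) % 2 == 0 and x % (2 ** (i + 1)) >= 2 ** i else '0'
--     parity = parity[::-1]
--     return int(parity, 2)
-- ===== SOURCE B (Python) =====
-- def acc_parity(x):
--     # The cumulative XOR of 0..x is given by the classic closed form
--     # selected by x % 4: x, 1, x + 1, 0.  A truncates to the low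
--     # 40 bits, which is a reduction modulo 2**40.
--     r = x % 4
--     v = (x, 1, x + 1, 0)[r]
--     return v % (1 << 40)
-- ===== Notes on version B (the rewrite author's own statement) =====
-- stated objective: simpler
-- what changed: Replaces the 40-iteration loop that builds a bit string character by character (one modulus test per bit) and re-parses it with int(.,2) by the constant-time closed form of the cumulative XOR selected by x % 4 (x, 1, x+1, 0), reduced modulo 2**40.
import Mathlib
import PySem

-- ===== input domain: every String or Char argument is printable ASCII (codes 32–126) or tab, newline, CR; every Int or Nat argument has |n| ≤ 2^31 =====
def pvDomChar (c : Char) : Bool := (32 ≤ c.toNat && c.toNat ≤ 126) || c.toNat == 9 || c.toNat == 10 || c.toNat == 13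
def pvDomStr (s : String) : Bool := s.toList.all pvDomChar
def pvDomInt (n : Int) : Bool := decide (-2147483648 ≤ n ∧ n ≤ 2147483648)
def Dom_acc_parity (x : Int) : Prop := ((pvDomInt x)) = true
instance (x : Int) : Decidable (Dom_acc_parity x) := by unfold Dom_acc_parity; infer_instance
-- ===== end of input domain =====

-- B replaces A's bit-string loop by the closed form of the cumulative XOR
-- (selected by x % 4) reduced mod 2^40; proved equal for every Int input.

-- ===== PORT A =====
-- hand port of int(s, 2): exact for nonempty strings of '0'/'1' characters,
-- which `parity` below always is (40 characters, each '0' or '1')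
def pvParseBin (s : String) : Int :=
  s.toList.foldl (fun acc c => 2 * acc + (if c = '1' then 1 else 0)) 0

-- 2 ** (i + 1) is ported as 2 ^ (i + 1).toNat: exact since i ranges over 0..39;
-- parity[::-1] is string reverse (PySem.Str.slice?_none_none_neg_one)
def acc_parity (x : Int) : Int :=
  let parity : String :=
    (PySem.List.pyRange 0 40 1).foldl (fun parity i =>
      if i = 0 then
        parity ++ (if PySem.Int.mod x 4 = 1 ∨ PySem.Int.mod x 4 = 2 then "1" else "0")
      else
        parity ++ (if PySem.Int.mod (PySem.Int.mod x (2 ^ (i + 1).toNat)) 2 = 0 ∧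
                      PySem.Int.mod x (2 ^ (i + 1).toNat) ≥ 2 ^ i.toNat then "1" else "0")) ""
  let parity := String.ofList parity.toList.reverse
  pvParseBin parity

-- ===== PORT B =====
-- (x, 1, x + 1, 0)[r] is ported as an if-chain on r, which is exact since r = x % 4 ∈ {0,1,2,3}
def acc_parity_alt (x : Int) : Int :=
  let r := PySem.Int.mod x 4
  let v := if r = 0 then x else if r = 1 then 1 else if r = 2 then x + 1 else 0
  PySem.Int.mod v (1 <<< 40)

-- ===== PRECONDITION & SPEC =====
def Spec_acc_parity (x : Int) (out : Int) : Prop := out = acc_parity_alt x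
instance (x : Int) (out : Int) : Decidable (Spec_acc_parity x out) := by unfold Spec_acc_parity; infer_instance

-- ===== CLAIM (what is proved, stated in full; the proofs are below) =====
def Claim_equal_acc_parity : Prop := ∀ (x : Int), Dom_acc_parity x → Spec_acc_parity x (acc_parity x)

-- ===== LEMMAS AND PROOFS =====

-- the closed-form value before the final reduction mod 2^40
def pvF (x : Int) : Int :=
  if x % 4 = 0 then x else if x % 4 = 1 then 1 else if x % 4 = 2 then x + 1 else 0

-- the character A appends at loop index k (Nat index, plain Int arithmetic)
def pvCh (x : Int) (k : Nat) : Char :=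
  if k = 0 then (if x % 4 = 1 ∨ x % 4 = 2 then '1' else '0')
  else (if x % 2 ^ (k + 1) % 2 = 0 ∧ x % 2 ^ (k + 1) ≥ 2 ^ k then '1' else '0')

-- the character A appends at loop index i, exactly as the port writes it (Int index)
def pvChI (x : Int) (i : Int) : Char :=
  if i = 0 then (if PySem.Int.mod x 4 = 1 ∨ PySem.Int.mod x 4 = 2 then '1' else '0')
  else (if PySem.Int.mod (PySem.Int.mod x (2 ^ (i + 1).toNat)) 2 = 0 ∧
           PySem.Int.mod x (2 ^ (i + 1).toNat) ≥ 2 ^ i.toNat then '1' else '0')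

lemma pvShift : (1 <<< 40 : Int) = 2 ^ 40 := by decide

lemma pvAlt_eq (x : Int) : acc_parity_alt x = pvF x % 2 ^ 40 := by
  unfold acc_parity_alt pvF
  rw [PySem.Int.mod_eq_emod_of_pos (a := x) (b := 4) (by norm_num), pvShift,
      PySem.Int.mod_eq_emod_of_pos (by positivity)]

lemma pvIfChar (c : Prop) [Decidable c] :
    (if (if c then '1' else '0') = '1' then (1 : Int) else 0) = if c then 1 else 0 := by
  split_ifs with h1 h2 <;> simp_all

-- a two-valued division: m / p is the "≥ p" bit when 0 ≤ m < 2p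
lemma pvDivBit {m p : Int} (hp : 0 < p) (h0 : 0 ≤ m) (h2 : m < 2 * p) :
    m / p = if p ≤ m then 1 else 0 := by
  have hd0 : 0 ≤ m / p := Int.ediv_nonneg h0 hp.le
  have hd2 : m / p < 2 := Int.ediv_lt_of_lt_mul hp (by linarith)
  have hmod0 : 0 ≤ m % p := Int.emod_nonneg m hp.ne'
  have hmodlt : m % p < p := Int.emod_lt_of_pos m hp
  have hdm := Int.ediv_add_emod m p
  interval_cases h : m / p <;> split_ifs <;> omega

-- (Y / p) % 2 is the low bit of Y with the p low bits dropped
lemma pvDivModTwo (Y p : Int) (hp : 0 < p) :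
    Y / p % 2 = Y % (2 * p) / p := by
  have h2p : (0 : Int) < 2 * p := by linarith
  have h := Int.ediv_add_emod Y (2 * p)
  have hm0 : 0 ≤ Y % (2 * p) := Int.emod_nonneg _ h2p.ne'
  have hmlt : Y % (2 * p) < 2 * p := Int.emod_lt_of_pos _ h2p
  have hdiv : Y / p = 2 * (Y / (2 * p)) + Y % (2 * p) / p := by
    conv_lhs => rw [← h]
    rw [show 2 * p * (Y / (2 * p)) + Y % (2 * p)
          = Y % (2 * p) + 2 * (Y / (2 * p)) * p by ring,
        Int.add_mul_ediv_right _ _ hp.ne']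
    ring
  have hb : Y % (2 * p) / p = if p ≤ Y % (2 * p) then 1 else 0 := pvDivBit hp hm0 hmlt
  rw [hdiv]
  split_ifs at hb ⊢ <;> omega

-- heart lemma: the bit A computes at position k is bit k of the closed form pvF x
lemma pvBit_eq (x : Int) (k : Nat) :
    (if pvCh x k = '1' then (1 : Int) else 0) = pvF x % 2 ^ (k + 1) / 2 ^ k := by
  have hp : (0 : Int) < 2 ^ k := by positivity
  have hq : (2 : Int) ^ (k + 1) = 2 * 2 ^ k := by ring
  have hx4 : 0 ≤ x % 4 ∧ x % 4 < 4 :=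
    ⟨Int.emod_nonneg x (by norm_num), Int.emod_lt_of_pos x (by norm_num)⟩
  have hx2 : x % 4 % 2 = x % 2 := Int.emod_emod_of_dvd x (by norm_num)
  have hmx2 : x % 2 ^ (k + 1) % 2 = x % 2 := Int.emod_emod_of_dvd x ⟨2 ^ k, hq⟩
  have hmx : 0 ≤ x % 2 ^ (k + 1) ∧ x % 2 ^ (k + 1) < 2 ^ (k + 1) :=
    ⟨Int.emod_nonneg x (by positivity), Int.emod_lt_of_pos x (by positivity)⟩
  unfold pvCh pvF
  rcases Nat.eq_zero_or_pos k with hk | hk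
  · subst hk
    rw [if_pos rfl, pvIfChar]
    simp only [pow_zero, Int.ediv_one] at *
    have hx1 : (x + 1) % 2 = (x % 2 + 1 % 2) % 2 := Int.add_emod x 1 2
    split_ifs <;> omega
  · have hk0 : k ≠ 0 := hk.ne'
    rw [if_neg hk0, pvIfChar]
    rcases (by omega : x % 4 = 0 ∨ x % 4 = 1 ∨ x % 4 = 2 ∨ x % 4 = 3) with h4 | h4 | h4 | h4
    · -- pvF x = x
      rw [if_pos h4, pvDivBit hp hmx.1 (by omega)]
      split_ifs <;> omega
    · -- pvF x = 1
      rw [if_neg (show ¬ x % 4 = 0 by omega), if_pos h4]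
      have h2k : (2 : Int) ≤ 2 ^ k := by
        calc (2:Int) = 2 ^ 1 := by norm_num
        _ ≤ 2 ^ k := pow_le_pow_right₀ (by norm_num) (by omega)
      rw [Int.emod_eq_of_lt (a := 1) (by norm_num) (by omega),
          Int.ediv_eq_zero_of_lt (by norm_num) (by omega)]
      split_ifs <;> omega
    · -- pvF x = x + 1
      obtain ⟨c, hc⟩ : (2 : Int) ∣ 2 ^ k := dvd_pow_self 2 hk0
      rw [if_neg (show ¬ x % 4 = 0 by omega), if_neg (show ¬ x % 4 = 1 by omega), if_pos h4]
      have hx1 : (x + 1) % 2 ^ (k + 1) = x % 2 ^ (k + 1) + 1 := by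
        rw [Int.add_emod,
            Int.emod_eq_of_lt (a := 1) (by norm_num) (by omega : (1:Int) < 2 ^ (k + 1)),
            Int.emod_eq_of_lt (by omega) (by omega)]
      rw [hx1, pvDivBit hp (by omega) (by omega)]
      split_ifs <;> omega
    · -- pvF x = 0
      rw [if_neg (show ¬ x % 4 = 0 by omega), if_neg (show ¬ x % 4 = 1 by omega),
          if_neg (show ¬ x % 4 = 2 by omega), Int.zero_emod, Int.zero_ediv]
      split_ifs <;> omega

-- A's string-building loop, seen through toList: it appends one character per index
lemma pvFold_toList (g : Int → Char) :
    ∀ (l : List Int) (s : String),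
      (l.foldl (fun p i => p ++ String.singleton (g i)) s).toList
        = s.toList ++ l.map g := by
  intro l
  induction l with
  | nil => intro s; simp
  | cons a l ih =>
    intro s
    rw [List.foldl_cons, ih]
    simp

-- the loop body of the port appends exactly the character pvChI
lemma pvBody_eq (x : Int) :
    (fun (parity : String) (i : Int) =>
      if i = 0 then
        parity ++ (if PySem.Int.mod x 4 = 1 ∨ PySem.Int.mod x 4 = 2 then "1" else "0")
      else
        parity ++ (if PySem.Int.mod (PySem.Int.mod x (2 ^ (i + 1).toNat)) 2 = 0 ∧
                      PySem.Int.mod x (2 ^ (i + 1).toNat) ≥ 2 ^ i.toNat then "1" else "0"))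
    = fun p i => p ++ String.singleton (pvChI x i) := by
  funext p i
  unfold pvChI
  split_ifs <;> rfl

-- on a Nat index, the port's character is pvCh
lemma pvChI_cast (x : Int) (k : Nat) : pvChI x (0 + (k : Int)) = pvCh x k := by
  unfold pvChI pvCh
  have h1 : ((0 : Int) + (k : Int) + 1).toNat = k + 1 := by omega
  have h2 : ((0 : Int) + (k : Int)).toNat = k := by omega
  have h3 : ((0 : Int) + (k : Int) = 0) ↔ k = 0 := by omega
  rw [h1, h2,
      PySem.Int.mod_eq_emod_of_pos (a := x) (b := 4) (by norm_num),
      PySem.Int.mod_eq_emod_of_pos (a := x) (b := 2 ^ (k + 1)) (by positivity),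
      PySem.Int.mod_eq_emod_of_pos (by norm_num)]
  by_cases hk : k = 0
  · rw [if_pos (h3.mpr hk), if_pos hk]
  · rw [if_neg (fun h => hk (h3.mp h)), if_neg hk]

-- the parsed value of the bit list over positions k..39 is pvF x % 2^40 / 2^k
lemma pvMain (x : Int) :
    ∀ (n k : Nat), k + n = 40 →
      ((List.range' k n).map (pvCh x)).foldr
          (fun c acc => 2 * acc + (if c = '1' then 1 else 0)) 0
        = pvF x % 2 ^ 40 / 2 ^ k := by
  have hY0 : 0 ≤ pvF x % 2 ^ 40 := Int.emod_nonneg _ (by norm_num)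
  have hYlt : pvF x % 2 ^ 40 < 2 ^ 40 := Int.emod_lt_of_pos _ (by norm_num)
  intro n
  induction n with
  | zero =>
    intro k hk
    have h40 : k = 40 := by omega
    subst h40
    rw [show List.range' 40 0 = [] from rfl]
    simp only [List.map_nil, List.foldr_nil]
    exact (Int.ediv_eq_zero_of_lt hY0 hYlt).symm
  | succ n ih =>
    intro k hk
    rw [List.range'_succ, List.map_cons, List.foldr_cons, ih (k + 1) (by omega)]
    have hp : (0 : Int) < 2 ^ k := by positivity
    have hbit : (if pvCh x k = '1' then (1 : Int) else 0) = pvF x % 2 ^ 40 / 2 ^ k % 2 := by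
      rw [pvBit_eq x k, pvDivModTwo _ _ hp,
          show (2 : Int) * 2 ^ k = 2 ^ (k + 1) by ring,
          Int.emod_emod_of_dvd _ (pow_dvd_pow 2 (by omega))]
    have hdd : pvF x % 2 ^ 40 / 2 ^ (k + 1) = pvF x % 2 ^ 40 / 2 ^ k / 2 := by
      rw [Int.ediv_ediv_of_nonneg (by positivity),
          show (2:Int) ^ k * 2 = 2 ^ (k + 1) by ring]
    rw [hdd, hbit]
    omega

-- ===== VERDICT (by name: the statement is the Claim_ definition above) =====
theorem acc_parity_spec : Claim_equal_acc_parity := by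
  intro x _
  unfold Spec_acc_parity acc_parity pvParseBin
  rw [pvAlt_eq, pvBody_eq x, PySem.List.pyRange_one]
  simp only [pvFold_toList, String.toList_ofList, List.foldl_reverse, String.toList_empty,
    List.nil_append, List.map_map, Function.comp_def, pvChI_cast,
    show ((40 : Int) - 0).toNat = 40 from by decide, List.range_eq_range']
  rw [pvMain x 40 0 rfl]
  norm_num
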